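-- pv_equiv track=rewrite | github.com/lingpy/lingpy | lingpy/algorithm/clustering.py | _interprete_matrix
-- ===== SOURCE A (Python) =====
-- def _interprete_matrix(matrix):
--     """
--     Look for attracting nodes in the matrix.
--     """
--     clusters = []
--     flags = len(matrix) * [False]
--     for i in range(len(matrix)):
--         clr = []
--         for j in range(len(matrix)):
--             if not flags[j] and matrix[i][j] > 0:
--                 clr += [j]
--                 flags[j] = True
--         if clr:
--             clusters += [clr]
--
--     # make a converter for length
--     out = [0 for i in range(len(matrix))]
--     idx = 1
--     for clr in clusters:
--         for i in clr:
--             out[i] = idx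
--         idx += 1
--
--     if sum(out) == 0:
--         return list(range(len(out)))
--
--     return out
-- ===== SOURCE B (Python) =====
-- def _interprete_matrix(matrix):
--     """
--     Look for attracting nodes in the matrix.
--     """
--     n = len(matrix)
--     # attractor of column j: the smallest row index i with matrix[i][j] > 0, else None
--     def attractor(j):
--         for i in range(n):
--             if matrix[i][j] > 0:
--                 return i
--         return None
--
--     atts = [attractor(j) for j in range(n)]
--     attset = set(a for a in atts if a is not None)
--     rows = [i for i in range(n) if i in attset]          # attractor rows, ascending
--     label = {r: k + 1 for k, r in enumerate(rows)}       # sequential labels in row order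
--     if not rows:
--         return list(range(n))
--     return [label[a] if a is not None else 0 for a in atts]
-- ===== Notes on version B (the rewrite author's own statement) =====
-- stated objective: alternative
-- what changed: B replaces A's stateful row sweep (flags array, cluster lists, then a relabelling pass) by a per-column computation: each column's attractor is its first positive row, distinct attractor rows in ascending order get sequential labels, and the all-zero case returns range(n).
-- outside the precondition, e.g. on _interprete_matrix([[1, 1], [1]]): A returns [1, 1], B returns [1, 1]
import Mathlib
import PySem

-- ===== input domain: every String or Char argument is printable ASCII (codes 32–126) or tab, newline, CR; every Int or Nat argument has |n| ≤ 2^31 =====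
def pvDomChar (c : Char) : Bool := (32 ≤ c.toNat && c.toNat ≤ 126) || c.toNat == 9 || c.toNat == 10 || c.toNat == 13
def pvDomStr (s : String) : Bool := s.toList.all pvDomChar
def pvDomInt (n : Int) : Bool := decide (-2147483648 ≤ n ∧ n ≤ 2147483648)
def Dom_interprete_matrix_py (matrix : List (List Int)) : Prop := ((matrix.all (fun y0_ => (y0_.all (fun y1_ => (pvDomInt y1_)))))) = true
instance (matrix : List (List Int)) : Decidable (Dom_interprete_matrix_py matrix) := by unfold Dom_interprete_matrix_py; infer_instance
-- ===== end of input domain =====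

-- B replaces A's flagged row sweep and relabelling pass by a per-column
-- attractor computation (first positive row per column, attractor rows
-- labelled in ascending order); an alternative decomposition of the same task.


-- matrix[i][j]; exact on Pre_ (both indices are in range there)
def pvMGet (matrix : List (List Int)) (i j : Nat) : Int := (matrix.getD i []).getD j 0

-- ===== PORT A =====
def interprete_matrix_py (matrix : List (List Int)) : List Int :=
  let n := matrix.length
  let st := (List.range n).foldl (fun (st : List (List Nat) × List Bool) i =>
      let st2 := (List.range n).foldl (fun (st2 : List Nat × List Bool) j =>
          if !st2.2.getD j false && decide (0 < pvMGet matrix i j) then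
            (st2.1 ++ [j], st2.2.set j true)
          else st2) ([], st.2)
      if st2.1.isEmpty then (st.1, st2.2) else (st.1 ++ [st2.1], st2.2))
    ([], List.replicate n false)
  let out := (st.1.foldl (fun (st3 : List Int × Int) clr =>
      (clr.foldl (fun o i => o.set i st3.2) st3.1, st3.2 + 1))
    (List.replicate n (0 : Int), 1)).1
  if out.sum = 0 then (List.range n).map (fun i => (i : Int)) else out

-- ===== PORT B =====
-- attractor of column j: the first row i with matrix[i][j] > 0
def pvAtt (matrix : List (List Int)) (j : Nat) : Option Nat :=
  (List.range matrix.length).find? (fun i => decide (0 < pvMGet matrix i j))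

def interprete_matrix_py_alt (matrix : List (List Int)) : List Int :=
  let n := matrix.length
  let atts := (List.range n).map (pvAtt matrix)
  let rows := (List.range n).filter (fun i => atts.contains (some i))
  if rows.isEmpty then (List.range n).map (fun i => (i : Int))
  else atts.map (fun a => match a with
    | none => 0
    | some r => ((rows.idxOf r : Nat) : Int) + 1)

-- ===== PRECONDITION & SPEC =====
-- Pre_ excludes the ragged matrices (some row shorter than the number of rows), on
-- which Python A usually raises IndexError; on a few of them the short entries are
-- skipped by the flag short-circuit and both programs still return the same value.
def Pre_interprete_matrix_py (matrix : List (List Int)) : Prop :=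
  ∀ row ∈ matrix, matrix.length ≤ row.length
instance (matrix : List (List Int)) : Decidable (Pre_interprete_matrix_py matrix) := by
  unfold Pre_interprete_matrix_py; infer_instance
def pvWitness_interprete_matrix_py : List (List Int) := [[0, 1], [1, 0]]

def Spec_interprete_matrix_py (matrix : List (List Int)) (out : List Int) : Prop := out = interprete_matrix_py_alt matrix
instance (matrix : List (List Int)) (out : List Int) : Decidable (Spec_interprete_matrix_py matrix out) := by unfold Spec_interprete_matrix_py; infer_instance

-- ===== CLAIM (what is proved, stated in full; the proofs are below) =====
def Claim_equal_interprete_matrix_py : Prop := ∀ (matrix : List (List Int)), Dom_interprete_matrix_py matrix → Pre_interprete_matrix_py matrix → Spec_interprete_matrix_py matrix (interprete_matrix_py matrix)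

-- ===== LEMMAS AND PROOFS =====

def pvClr (matrix : List (List Int)) (i : Nat) : List Nat :=
  (List.range matrix.length).filter (fun j => decide (pvAtt matrix j = some i))

def pvOuterStep (m : List (List Int)) (st : List (List Nat) × List Bool) (i : Nat) :
    List (List Nat) × List Bool :=
  let st2 := (List.range m.length).foldl (fun (st2 : List Nat × List Bool) j =>
      if !st2.2.getD j false && decide (0 < pvMGet m i j) then
        (st2.1 ++ [j], st2.2.set j true)
      else st2) ([], st.2)
  if st2.1.isEmpty then (st.1, st2.2) else (st.1 ++ [st2.1], st2.2)

def pvState (m : List (List Int)) (k : Nat) : List (List Nat) × List Bool :=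
  (List.range k).foldl (pvOuterStep m) ([], List.replicate m.length false)

theorem att_some_iff (m : List (List Int)) (j i : Nat) :
    pvAtt m j = some i ↔
      i < m.length ∧ 0 < pvMGet m i j ∧ ∀ i' < i, ¬ 0 < pvMGet m i' j := by
  unfold pvAtt
  rw [List.find?_eq_some_iff_getElem]
  simp only [List.getElem_range, List.length_range, decide_eq_true_eq, Bool.not_eq_eq_eq_not,
    Bool.not_true, decide_eq_false_iff_not]
  constructor
  · rintro ⟨hp, k, hk, rfl, hall⟩
    exact ⟨hk, hp, fun i' hi' => hall i' hi'⟩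
  · rintro ⟨hi, hp, hall⟩
    exact ⟨hp, i, hi, rfl, fun i' hi' => hall i' hi'⟩

theorem getD_set' (l : List Bool) (i j : Nat) (b d : Bool) :
    (l.set i b).getD j d = if i = j ∧ j < l.length then b else l.getD j d := by
  by_cases hij : i = j <;> by_cases hjl : j < l.length <;>
    simp [List.getD, hij, hjl]

theorem setall_len (v : Int) : ∀ (c : List Nat) (o : List Int),
    (c.foldl (fun o i => o.set i v) o).length = o.length := by
  intro c
  induction c with
  | nil => simp
  | cons a c ih => intro o; simp [List.foldl_cons, ih]

theorem setall_getD (v : Int) : ∀ (c : List Nat) (o : List Int) (j : Nat),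
    ((c.foldl (fun o i => o.set i v) o).getD j 0)
      = if j ∈ c ∧ j < o.length then v else o.getD j 0 := by
  intro c
  induction c with
  | nil => simp
  | cons a c ih =>
    intro o j
    rw [List.foldl_cons, ih]
    by_cases hjc : j ∈ c <;> by_cases hjl : j < o.length <;>
      by_cases hja : a = j <;>
      simp_all [List.getD] <;> exact fun h => absurd h.symm hja

theorem flags_foldl_len (m : List (List Int)) (i : Nat) (f : List Bool) (L : List Nat) :
    (L.foldl (fun (f' : List Bool) j =>
        if decide (0 < pvMGet m i j) then f'.set j true else f') f).length = f.length := by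
  induction L generalizing f with
  | nil => simp
  | cons a L ih => simp only [List.foldl_cons]; rw [ih]; split <;> simp

theorem flags_foldl_char (m : List (List Int)) (i : Nat) (f : List Bool) (L : List Nat) (j : Nat) :
    (L.foldl (fun (f' : List Bool) j =>
        if decide (0 < pvMGet m i j) then f'.set j true else f') f).getD j false
      = (f.getD j false || (decide (j ∈ L) && decide (j < f.length) && decide (0 < pvMGet m i j))) := by
  induction L generalizing f with
  | nil => simp
  | cons a L ih =>
    rw [List.foldl_cons]
    by_cases ha : (0 : Int) < pvMGet m i a
    · rw [if_pos (by simpa using ha), ih, getD_set']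
      simp only [List.length_set]
      by_cases haj : a = j
      · subst haj
        by_cases hjl : a < f.length <;> simp [hjl, ha]
      · have hja : (j = a) = False := by simp [Ne.symm haj]
        simp [haj, hja]
    · rw [if_neg (by simpa using ha), ih]
      by_cases haj : a = j
      · subst haj; simp [ha]
      · have hja : (j = a) = False := by simp [Ne.symm haj]
        simp [hja]

theorem set_self_of_getD (f : List Bool) (a : Nat) (h : f.getD a false = true) :
    f.set a true = f := by
  by_cases hl : a < f.length
  · have hv : f[a] = true := by simpa [List.getD, List.getElem?_eq_getElem hl] using h
    conv_lhs => rw [← hv]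
    exact List.set_getElem_self ..
  · exact List.set_eq_of_length_le (by omega)

theorem inner_loop_char (m : List (List Int)) (i : Nat) :
    ∀ (L : List Nat), L.Nodup → ∀ (c0 : List Nat) (f : List Bool),
      (L.foldl (fun (st2 : List Nat × List Bool) j =>
          if !st2.2.getD j false && decide (0 < pvMGet m i j) then
            (st2.1 ++ [j], st2.2.set j true)
          else st2) (c0, f)) =
        ((c0 ++ L.filter (fun j => !f.getD j false && decide (0 < pvMGet m i j)),
          L.foldl (fun (f' : List Bool) j =>
            if decide (0 < pvMGet m i j) then f'.set j true else f') f)) := by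
  intro L
  induction L with
  | nil => simp
  | cons a L ih =>
    intro hnd c0 f
    have hnd' := hnd.of_cons
    have hna : a ∉ L := by simpa using (List.nodup_cons.mp hnd).1
    rw [List.foldl_cons, List.foldl_cons]
    by_cases hc : (!f.getD a false && decide (0 < pvMGet m i a)) = true
    · rw [if_pos hc]
      have hc' : f.getD a false = false ∧ (0 : Int) < pvMGet m i a := by simpa using hc
      have hp := hc'.2
      rw [ih hnd' (c0 ++ [a]) (f.set a true)]
      have hfilt : L.filter (fun j => !(f.set a true).getD j false && decide (0 < pvMGet m i j))
          = L.filter (fun j => !f.getD j false && decide (0 < pvMGet m i j)) := by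
        apply List.filter_congr
        intro j hj
        have : ¬ a = j := fun h => hna (h ▸ hj)
        rw [getD_set']
        simp [this]
      rw [hfilt]
      simp only [List.filter_cons, hc, if_true, if_pos (show (decide ((0:Int) < pvMGet m i a)) = true by simpa using hp)]
      simp
    · rw [if_neg hc]
      have hcf : (!f.getD a false && decide (0 < pvMGet m i a)) = false := by
        simpa using hc
      simp only [List.filter_cons, hcf, Bool.false_eq_true, if_false]
      by_cases hp : (0 : Int) < pvMGet m i a
      · have hfa : f.getD a false = true := by simpa [hp] using hcf
        rw [if_pos (by simpa using hp), set_self_of_getD f a hfa]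
        exact ih hnd' c0 f
      · rw [if_neg (by simpa using hp)]
        exact ih hnd' c0 f

theorem outer_loop_char (m : List (List Int)) : ∀ (k : Nat), k ≤ m.length →
    (pvState m k).1 = ((List.range k).map (pvClr m)).filter (fun c => !c.isEmpty)
    ∧ (pvState m k).2.length = m.length
    ∧ ∀ j, (pvState m k).2.getD j false
        = decide (j < m.length ∧ ∃ i < k, 0 < pvMGet m i j) := by
  intro k
  induction k with
  | zero =>
    intro _
    refine ⟨by simp [pvState], by simp [pvState], fun j => ?_⟩
    by_cases hj : j < m.length <;>
      simp [pvState, List.getD, hj]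
  | succ k ih =>
    intro hk1
    have hk : k ≤ m.length := by omega
    have hkn : k < m.length := by omega
    obtain ⟨hcl, hlen, hfl⟩ := ih hk
    have hstep : pvState m (k + 1) = pvOuterStep m (pvState m k) k := by
      rw [pvState, List.range_succ, List.foldl_append, List.foldl_cons, List.foldl_nil, ← pvState]
    rw [hstep, pvOuterStep,
      inner_loop_char m k (List.range m.length) (List.nodup_range) [] (pvState m k).2]
    have hfilt : (List.range m.length).filter
        (fun j => !(pvState m k).2.getD j false && decide (0 < pvMGet m k j)) = pvClr m k := by
      rw [pvClr]
      apply List.filter_congr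
      intro j hj
      have hjn : j < m.length := List.mem_range.mp hj
      rw [hfl j]
      by_cases hp : (0 : Int) < pvMGet m k j
      · by_cases hprev : ∃ i < k, 0 < pvMGet m i j
        · have hne : ¬ pvAtt m j = some k := by
            rw [att_some_iff]
            rintro ⟨-, -, hall⟩
            obtain ⟨i0, hi0, hp0⟩ := hprev
            exact hall i0 hi0 hp0
          simp [hjn, hprev, hne]
        · have heq : pvAtt m j = some k := by
            rw [att_some_iff]
            exact ⟨hkn, hp, fun i' hi' hp' => hprev ⟨i', hi', hp'⟩⟩
          simp [hjn, hp, hprev, heq]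
      · have hne : ¬ pvAtt m j = some k := by
          rw [att_some_iff]
          rintro ⟨-, hp', -⟩
          exact hp hp'
        simp [hp, hne]
    rw [hfilt]
    simp only [List.nil_append]
    have hflen := flags_foldl_len m k (pvState m k).2 (List.range m.length)
    have hflen2 : (List.foldl (fun (f' : List Bool) j =>
        if decide (0 < pvMGet m k j) then f'.set j true else f') (pvState m k).2
        (List.range m.length)).length = m.length := by rw [hflen, hlen]
    have hflags : ∀ j, (List.foldl (fun (f' : List Bool) j =>
        if decide (0 < pvMGet m k j) then f'.set j true else f') (pvState m k).2
        (List.range m.length)).getD j false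
        = decide (j < m.length ∧ ∃ i < k + 1, 0 < pvMGet m i j) := by
      intro j
      rw [flags_foldl_char, hfl j, hlen]
      by_cases hjn : j < m.length
      · by_cases hp : (0 : Int) < pvMGet m k j
        · simp only [hjn, true_and]
          have hiff : (∃ i < k + 1, (0:Int) < pvMGet m i j) := ⟨k, by omega, hp⟩
          by_cases hprev : ∃ i < k, (0:Int) < pvMGet m i j <;>
            simp [hjn, hp, hprev] <;>
            exact ⟨k, le_refl k, hp⟩
        · simp only [hjn, true_and]
          have hiff : (∃ i ≤ k, (0:Int) < pvMGet m i j) ↔ ∃ i < k, (0:Int) < pvMGet m i j := by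
            constructor
            · rintro ⟨i0, hi0, hp0⟩
              rcases Nat.lt_or_ge i0 k with h | h
              · exact ⟨i0, h, hp0⟩
              · have hik : i0 = k := by omega
                subst hik
                exact absurd hp0 hp
            · rintro ⟨i0, hi0, hp0⟩
              exact ⟨i0, by omega, hp0⟩
          simp [hiff, hp]
      · simp [hjn]
    have hclnew : ((pvState m k).1 ++ if (pvClr m k).isEmpty then [] else [pvClr m k])
        = ((List.range (k+1)).map (pvClr m)).filter (fun c => !c.isEmpty) := by
      rw [List.range_succ, List.map_append, List.filter_append, hcl]
      by_cases he : (pvClr m k).isEmpty <;> simp [he]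
    by_cases he : (pvClr m k).isEmpty
    · rw [if_pos he]
      refine ⟨?_, hflen2, hflags⟩
      rw [← hclnew]
      simp [he]
    · rw [if_neg he]
      refine ⟨?_, hflen2, hflags⟩
      rw [← hclnew]
      simp [he]

theorem relabel_len : ∀ (cs : List (List Nat)) (o : List Int) (idx : Int),
    (cs.foldl (fun (st3 : List Int × Int) clr =>
        (clr.foldl (fun o i => o.set i st3.2) st3.1, st3.2 + 1)) (o, idx)).1.length = o.length := by
  intro cs
  induction cs with
  | nil => simp
  | cons c cs ih =>
    intro o idx
    rw [List.foldl_cons, ih, setall_len]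

theorem relabel_getD : ∀ (cs : List (List Nat)) (o : List Int) (idx : Int) (j : Nat),
    (∀ c ∈ cs, ∀ x ∈ c, x < o.length) →
    cs.Pairwise (fun c c' => ∀ x, x ∈ c → x ∉ c') →
    ((cs.foldl (fun (st3 : List Int × Int) clr =>
        (clr.foldl (fun o i => o.set i st3.2) st3.1, st3.2 + 1)) (o, idx)).1.getD j 0)
      = match cs.findIdx? (fun c => decide (j ∈ c)) with
        | some k => idx + k
        | none => o.getD j 0 := by
  intro cs
  induction cs with
  | nil => simp
  | cons c cs ih =>
    intro o idx j hb hp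
    have hb' : ∀ c' ∈ cs, ∀ x ∈ c', x < (c.foldl (fun o i => o.set i idx) o).length := by
      rw [setall_len]
      exact fun c' hc' => hb c' (List.mem_cons_of_mem c hc')
    rw [List.foldl_cons, ih _ _ _ hb' hp.of_cons, List.findIdx?_cons]
    by_cases hjc : j ∈ c
    · have hnotin : ∀ c' ∈ cs, j ∉ c' := fun c' hc' =>
        (List.pairwise_cons.mp hp).1 c' hc' j hjc
      have hnone : cs.findIdx? (fun c => decide (j ∈ c)) = none := by
        rw [List.findIdx?_eq_none_iff]
        intro c' hc'
        simp [hnotin c' hc']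
      rw [hnone, if_pos (by simpa using hjc)]
      rw [setall_getD]
      have hjl : j < o.length := hb c (List.mem_cons_self ..) j hjc
      simp [hjc, hjl]
    · rw [if_neg (by simpa using hjc), setall_getD]
      simp only [hjc, false_and, if_false]
      cases hfi : cs.findIdx? (fun c => decide (j ∈ c)) with
      | none => simp
      | some k => simp only [Option.map_some]; push_cast; ring

theorem findIdx?_eq_idxOf : ∀ (l : List Nat) (r : Nat), r ∈ l →
    l.findIdx? (fun i => decide (i = r)) = some (l.idxOf r) := by
  intro l
  induction l with
  | nil => intro r hr; cases hr
  | cons a l ih =>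
    intro r hr
    rw [List.findIdx?_cons]
    by_cases har : a = r
    · subst har
      simp
    · have hrl : r ∈ l := by
        cases List.mem_cons.mp hr with
        | inl h => exact absurd h.symm har
        | inr h => exact h
      rw [if_neg (by simpa using har), ih r hrl]
      simp [har]

theorem mem_pvClr (m : List (List Int)) (i j : Nat) :
    j ∈ pvClr m i ↔ j < m.length ∧ pvAtt m j = some i := by
  simp [pvClr, List.mem_filter, List.mem_range]

theorem ports_agree (m : List (List Int)) :
    interprete_matrix_py m = interprete_matrix_py_alt m := by
  have hmain := outer_loop_char m m.length le_rfl
  obtain ⟨hcl, -, -⟩ := hmain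
  -- names
  set n := m.length with hn
  set atts := (List.range n).map (pvAtt m) with hatts
  set rows := (List.range n).filter (fun i => atts.contains (some i)) with hrows
  set rowsC := (List.range n).filter (fun i => !(pvClr m i).isEmpty) with hrowsC
  -- (F2) the two "rows" agree
  have hrowseq : rows = rowsC := by
    rw [hrows, hrowsC]
    apply List.filter_congr
    intro i _
    rw [Bool.eq_iff_iff]
    simp only [hatts, List.contains_eq_mem, List.mem_map, List.mem_range,
      Bool.not_eq_true', List.isEmpty_eq_false_iff, ne_eq, decide_eq_true_eq]
    constructor
    · rintro ⟨j, hj, hja⟩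
      have hjc : j ∈ pvClr m i := (mem_pvClr m i j).mpr ⟨hj, hja⟩
      exact List.ne_nil_of_mem hjc
    · intro hne
      obtain ⟨j, hj⟩ := List.exists_mem_of_ne_nil _ hne
      obtain ⟨hjn, hja⟩ := (mem_pvClr m i j).mp hj
      exact ⟨j, hjn, hja⟩
  -- (F3) clusters = rowsC.map pvClr
  have hclusters : (pvState m n).1 = rowsC.map (pvClr m) := by
    rw [hcl, List.filter_map, hrowsC]
    rfl
  -- bounds
  have hbound : ∀ c ∈ rowsC.map (pvClr m), ∀ x ∈ c, x < (List.replicate n (0:Int)).length := by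
    intro c hc x hx
    rw [List.length_replicate]
    obtain ⟨i, -, rfl⟩ := List.mem_map.mp hc
    exact ((mem_pvClr m i x).mp hx).1
  -- disjointness
  have hdisj : (rowsC.map (pvClr m)).Pairwise (fun c c' => ∀ x, x ∈ c → x ∉ c') := by
    rw [List.pairwise_map]
    have hnd : rowsC.Nodup := (List.nodup_range).filter _
    refine hnd.pairwise_of_forall_ne ?_
    intro i hi i' hi' hne x hx hx'
    have h1 := ((mem_pvClr m i x).mp hx).2
    have h2 := ((mem_pvClr m i' x).mp hx').2
    rw [h1] at h2
    exact hne (Option.some.injEq .. ▸ h2 ▸ rfl)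
  -- out characterization
  set outA := (((pvState m n).1).foldl (fun (st3 : List Int × Int) clr =>
      (clr.foldl (fun o i => o.set i st3.2) st3.1, st3.2 + 1))
    (List.replicate n (0 : Int), 1)).1 with houtA
  have hlenA : outA.length = n := by
    rw [houtA, relabel_len, List.length_replicate]
  have hgetA : ∀ j, outA.getD j 0 =
      match rowsC.findIdx? (fun i => decide (j < n ∧ pvAtt m j = some i)) with
      | some k => 1 + (k : Int)
      | none => 0 := by
    intro j
    rw [houtA, hclusters, relabel_getD _ _ _ _ hbound hdisj, List.findIdx?_map]
    have hpred : ((fun c => decide (j ∈ c)) ∘ pvClr m) = fun i => decide (j < n ∧ pvAtt m j = some i) := by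
      funext i
      simp [Function.comp, mem_pvClr, hn]
    rw [hpred]
    cases rowsC.findIdx? (fun i => decide (j < n ∧ pvAtt m j = some i)) with
    | none =>
      by_cases hjn : j < n <;> simp [List.getD, hjn]
    | some k => rfl
  -- unfold A
  show (if outA.sum = 0 then (List.range n).map (fun i => (i : Int)) else outA)
      = interprete_matrix_py_alt m
  by_cases hre : rows.isEmpty
  · -- no attractors: every entry of outA is 0
    have hrc : rowsC = [] := by rw [← hrowseq]; exact List.isEmpty_iff.mp hre
    have houtz : outA = List.replicate n (0:Int) := by
      rw [houtA, hclusters, hrc]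
      simp
    rw [houtz]
    have : (List.replicate n (0:Int)).sum = 0 := by simp
    rw [if_pos this]
    show _ = interprete_matrix_py_alt m
    rw [interprete_matrix_py_alt]
    simp only [← hn, ← hatts, ← hrows, hre, if_true]
  · -- some attractor exists
    have hrc : rowsC ≠ [] := by
      rw [← hrowseq]
      exact fun h => hre (List.isEmpty_iff.mpr h)
    -- all entries nonneg
    have hnonneg : ∀ x ∈ outA, (0:Int) ≤ x := by
      intro x hx
      obtain ⟨j, hj, rfl⟩ := List.mem_iff_getElem.mp hx
      rw [← List.getD_eq_getElem outA 0 hj, hgetA j]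
      cases rowsC.findIdx? (fun i => decide (j < n ∧ pvAtt m j = some i)) with
      | none => exact le_refl 0
      | some k =>
        show (0:Int) ≤ 1 + (k : Int)
        omega
    -- a positive entry exists
    obtain ⟨r, hr⟩ := List.exists_mem_of_ne_nil _ hrc
    have hrne : ¬ (pvClr m r).isEmpty := by
      have := (List.mem_filter.mp hr).2
      simpa using this
    have hclne : pvClr m r ≠ [] := by
      intro h
      rw [h] at hrne
      exact hrne rfl
    obtain ⟨j0, hj0⟩ := List.exists_mem_of_ne_nil _ hclne
    obtain ⟨hj0n, hj0a⟩ := (mem_pvClr m r j0).mp hj0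
    have hfind : rowsC.findIdx? (fun i => decide (j0 < n ∧ pvAtt m j0 = some i))
        = some (rowsC.idxOf r) := by
      have hpred2 : (fun i => decide (j0 < n ∧ pvAtt m j0 = some i)) = fun i => decide (i = r) := by
        funext i
        rw [decide_eq_decide]
        constructor
        · rintro ⟨-, h⟩
          rw [hj0a] at h
          exact (Option.some.inj h).symm
        · rintro rfl
          exact ⟨hj0n, hj0a⟩
      rw [hpred2]
      exact findIdx?_eq_idxOf rowsC r hr
    have hpos : (0:Int) < outA.getD j0 0 := by
      rw [hgetA j0, hfind]
      show (0:Int) < 1 + (rowsC.idxOf r : Int)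
      omega
    have hsum : outA.sum ≠ 0 := by
      have hj0lt : j0 < outA.length := by rw [hlenA]; exact hj0n
      have hmem : outA.getD j0 0 ∈ outA := by
        rw [List.getD_eq_getElem outA 0 hj0lt]
        exact List.getElem_mem hj0lt
      have hle := List.single_le_sum hnonneg _ hmem
      omega
    rw [if_neg hsum]
    -- now show outA = B's list
    rw [interprete_matrix_py_alt]
    simp only [← hn, ← hatts, ← hrows, hre, Bool.false_eq_true, if_false]
    apply List.ext_getElem
    · simp [hlenA, hatts]
    · intro j hj1 hj2
      have hjn : j < n := by rwa [hlenA] at hj1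
      have hjm : j < atts.length := by simp only [hatts, List.length_map, List.length_range]; exact hjn
      rw [← List.getD_eq_getElem outA 0 hj1, hgetA j]
      have hattsj : atts[j]'hjm = pvAtt m j := by
        show (List.map (pvAtt m) (List.range n))[j]'(by simpa [hatts] using hjm) = pvAtt m j
        rw [List.getElem_map, List.getElem_range]
      simp only [List.getElem_map, hattsj]
      cases hcase : pvAtt m j with
      | none =>
        have hnone : rowsC.findIdx? (fun i => decide (j < n ∧ (none : Option Nat) = some i)) = none := by
          rw [List.findIdx?_eq_none_iff]
          intro i _
          simp
        rw [hnone]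
      | some r' =>
        have hr'n : r' < n := by
          have := (att_some_iff m j r').mp hcase
          exact this.1
        have hjc : j ∈ pvClr m r' := (mem_pvClr m r' j).mpr ⟨hjn, hcase⟩
        have hr'mem : r' ∈ rowsC := by
          rw [hrowsC]
          rw [List.mem_filter]
          refine ⟨List.mem_range.mpr hr'n, ?_⟩
          simp only [Bool.not_eq_eq_eq_not, Bool.not_true, List.isEmpty_eq_false_iff]
          exact List.ne_nil_of_mem hjc
        have hfind2 : rowsC.findIdx? (fun i => decide (j < n ∧ (some r' : Option Nat) = some i))
            = some (rowsC.idxOf r') := by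
          have hpred2 : (fun i => decide (j < n ∧ (some r' : Option Nat) = some i))
              = fun i => decide (i = r') := by
            funext i
            rw [decide_eq_decide]
            constructor
            · rintro ⟨-, h⟩
              exact (Option.some.inj h).symm
            · rintro rfl
              exact ⟨hjn, rfl⟩
          rw [hpred2]
          exact findIdx?_eq_idxOf rowsC r' hr'mem
        rw [hfind2, ← hrowseq]
        push_cast
        ring

-- ===== VERDICT (by name: the statement is the Claim_ definition above) =====
theorem interprete_matrix_py_spec : Claim_equal_interprete_matrix_py := by
  intro matrix _ _
  show interprete_matrix_py matrix = interprete_matrix_py_alt matrix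
  exact ports_agree matrix
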